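-- pv_equiv track=rewrite | github.com/mmartyna123/codewars | 5kyu/k-divide.py | calculate_sum0
-- ===== SOURCE A (Python) =====
-- def calculate_sum0(N, K):
--     sum = 0
--     for number in range(1,N+1):
--         while number % K ==0:
--             quotient, remainder = divmod(number, K)
--             number = quotient
--         sum += number
--     return sum
-- ===== SOURCE B (Python) =====
-- def calculate_sum0(N, K):
--     # Divide-and-conquer on quotients: the numbers in 1..n divisible by K are
--     # K, 2K, ..., (n//K)*K; stripping one factor of K turns them into 1..n//K.
--     # So S(n) = (sum of 1..n) - K*(sum of 1..n//K) + S(n//K): O(log_K N) steps.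
--     def T(n):
--         return n * (n + 1) // 2
--
--     def S(n):
--         if n <= 0:
--             return 0
--         m = n // K
--         return T(n) - K * T(m) + S(m)
--
--     return S(N)
-- ===== Notes on version B (the rewrite author's own statement) =====
-- stated objective: faster
-- what changed: B replaces A's per-number while-stripping loop over 1..N by the quotient recursion S(n) = T(n) - K*T(n//K) + S(n//K) with T the triangular number, computing the whole sum in O(log_K N) arithmetic steps; Pre_ keeps N <= 0, K >= 2 and N < -K, excluding K in {-1,0,1} with N >= 1 (A raises or loops forever) and K <= -2 with N >= -K, a corner no specification of 'strip factors of K' covers, where A's value follows Python's floor-divmod sign convention and B's recursion gives another value.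
-- outside the precondition, e.g. on calculate_sum0(4, -2): A returns 4, B returns 12; on calculate_sum0(5, 0): A raises ZeroDivisionError, B raises ZeroDivisionError; on calculate_sum0(5, 1): A does not finish within the time limit, B raises RecursionError
import Mathlib
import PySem

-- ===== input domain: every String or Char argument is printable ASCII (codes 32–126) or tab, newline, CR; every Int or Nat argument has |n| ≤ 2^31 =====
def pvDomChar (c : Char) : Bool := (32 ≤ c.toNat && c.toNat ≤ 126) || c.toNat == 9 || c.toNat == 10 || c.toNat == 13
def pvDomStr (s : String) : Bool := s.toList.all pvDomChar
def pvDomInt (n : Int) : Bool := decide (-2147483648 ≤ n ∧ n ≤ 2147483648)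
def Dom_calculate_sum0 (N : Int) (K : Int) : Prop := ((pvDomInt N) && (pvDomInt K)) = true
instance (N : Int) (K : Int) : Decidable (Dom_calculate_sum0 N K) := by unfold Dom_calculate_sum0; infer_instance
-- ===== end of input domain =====

-- B replaces A's per-number stripping loop over 1..N by the quotient recursion
-- S(n) = T(n) - K*T(n//K) + S(n//K) with T = triangular number (objective: faster).

-- ===== PORT A =====
-- inner 'while number % K == 0' loop; fuel number.natAbs suffices on Pre_ (|number| strictly decreases)
def stripA : Nat → Int → Int → Int
  | 0, n, _ => n
  | f+1, n, K => if PySem.Int.mod n K = 0 then stripA f (PySem.Int.floordiv n K) K else n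

def calculate_sum0 (N : Int) (K : Int) : Int :=
  (PySem.List.pyRange 1 (N+1) 1).foldl (fun s number => s + stripA number.natAbs number K) 0

-- ===== PORT B =====
def pyTri (n : Int) : Int := PySem.Int.floordiv (n * (n + 1)) 2

-- B's recursive 'S'; fuel N.toNat+1 suffices on Pre_ (n strictly decreases to 0)
def goB : Nat → Int → Int → Int
  | 0, _, _ => 0
  | f+1, n, K =>
    if n ≤ 0 then 0
    else
      let m := PySem.Int.floordiv n K
      pyTri n - K * pyTri m + goB f m K

def calculate_sum0_alt (N : Int) (K : Int) : Int :=
  goB (N.toNat + 1) N K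

-- ===== PRECONDITION & SPEC =====
-- Pre_ excludes, for N ≥ 1 only: K = 0 (A raises ZeroDivisionError), K = ±1 (A's while loop never
-- terminates), and K ≤ -2 with N ≥ -K — a corner no specification of 'strip factors of K' covers:
-- there A's value follows Python's floor-divmod sign convention and B's recursion gives another
-- defensible value (for N < -K nothing in 1..N is divisible by K and both return T(N), kept inside).
def Pre_calculate_sum0 (N : Int) (K : Int) : Prop := N ≤ 0 ∨ 2 ≤ K ∨ N < -K
instance (N : Int) (K : Int) : Decidable (Pre_calculate_sum0 N K) := by unfold Pre_calculate_sum0; infer_instance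
def pvWitness_calculate_sum0 : Int × Int := (10, 2)

def Spec_calculate_sum0 (N : Int) (K : Int) (out : Int) : Prop := out = calculate_sum0_alt N K
instance (N : Int) (K : Int) (out : Int) : Decidable (Spec_calculate_sum0 N K out) := by unfold Spec_calculate_sum0; infer_instance

-- ===== CLAIM (what is proved, stated in full; the proofs are below) =====
def Claim_equal_calculate_sum0 : Prop := ∀ (N : Int) (K : Int), Dom_calculate_sum0 N K → Pre_calculate_sum0 N K → Spec_calculate_sum0 N K (calculate_sum0 N K)

-- ===== LEMMAS AND PROOFS =====

-- canonical fully-stripped value (stripA with just-enough fuel)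
def stripC (n K : Int) : Int := stripA n.natAbs n K

-- sum of stripped values of 1, 2, ..., n (the invariant object of the proof)
def Gsum (n : Nat) (K : Int) : Int :=
  ((List.range n).map (fun j => stripC ((j : Int) + 1) K)).sum

theorem pyTri_spec (x : Int) : 2 * pyTri x = x * (x + 1) := by
  unfold pyTri
  rw [PySem.Int.floordiv_eq_ediv_of_pos (by omega)]
  have he : (2:Int) ∣ x * (x + 1) := (Int.even_mul_succ_self x).two_dvd
  exact Int.mul_ediv_cancel' he

theorem pyTri_zero : pyTri 0 = 0 := by
  have := pyTri_spec 0; omega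

theorem pyTri_succ (x : Int) : pyTri (x + 1) = pyTri x + (x + 1) := by
  have a := pyTri_spec x
  have b := pyTri_spec (x + 1)
  ring_nf at a b ⊢
  linarith

theorem floordiv_exact (q K : Int) (hK : K ≠ 0) : PySem.Int.floordiv (q * K) K = q := by
  have h0 : PySem.Int.mod (q * K) K = 0 := (PySem.Int.mod_eq_zero_iff_dvd _ _).mpr (dvd_mul_left K q)
  have h := PySem.Int.floordiv_mul_add_mod (q * K) K
  rw [h0, add_zero] at h
  exact mul_right_cancel₀ hK h

theorem fd_shrink {n K : Int} (hK : 2 ≤ K) (hn : n ≠ 0) (h : PySem.Int.mod n K = 0) :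
    PySem.Int.floordiv n K ≠ 0 ∧ (PySem.Int.floordiv n K).natAbs < n.natAbs := by
  have hqn : PySem.Int.floordiv n K * K = n := by
    have h1 := PySem.Int.floordiv_mul_add_mod n K
    rw [h] at h1; omega
  set q := PySem.Int.floordiv n K with hq
  have habs : q.natAbs * K.natAbs = n.natAbs := by rw [← Int.natAbs_mul, hqn]
  have hq0 : q ≠ 0 := by rintro h0; rw [h0] at hqn; simp at hqn; exact hn hqn.symm
  refine ⟨hq0, ?_⟩
  have h1 : 1 ≤ q.natAbs := Nat.one_le_iff_ne_zero.mpr (Int.natAbs_ne_zero.mpr hq0)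
  have hK2 : 2 ≤ K.natAbs := by omega
  nlinarith

theorem stripA_fuel_irrel (K : Int) (hK : 2 ≤ K) :
    ∀ f g (n : Int), n ≠ 0 → n.natAbs ≤ f → n.natAbs ≤ g → stripA f n K = stripA g n K := by
  intro f
  induction f with
  | zero => intro g n hn hf _; exact absurd (Int.natAbs_eq_zero.mp (Nat.le_zero.mp hf)) hn
  | succ f ih =>
    intro g n hn hf hg
    obtain ⟨g', rfl⟩ : ∃ g', g = g' + 1 := ⟨g - 1, by omega⟩
    simp only [stripA]
    by_cases h : PySem.Int.mod n K = 0
    · rw [if_pos h, if_pos h]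
      obtain ⟨hq0, hlt⟩ := fd_shrink hK hn h
      exact ih g' _ hq0 (by omega) (by omega)
    · rw [if_neg h, if_neg h]

theorem stripC_of_not_dvd (n K : Int) (h : PySem.Int.mod n K ≠ 0) (hn : n ≠ 0) :
    stripC n K = n := by
  unfold stripC
  obtain ⟨f, hf⟩ : ∃ f, n.natAbs = f + 1 := ⟨n.natAbs - 1, by omega⟩
  rw [hf]; simp [stripA, h]

theorem stripC_of_dvd (n K : Int) (hK : 2 ≤ K) (h : PySem.Int.mod n K = 0) (hn : n ≠ 0) :
    stripC n K = stripC (PySem.Int.floordiv n K) K := by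
  obtain ⟨hq0, hlt⟩ := fd_shrink hK hn h
  obtain ⟨f, hf⟩ : ∃ f, n.natAbs = f + 1 := ⟨n.natAbs - 1, by omega⟩
  unfold stripC
  rw [hf]
  simp only [stripA, if_pos h]
  exact stripA_fuel_irrel K hK f _ _ hq0 (by omega) (le_refl _)

theorem Gsum_succ (n : Nat) (K : Int) :
    Gsum (n + 1) K = Gsum n K + stripC ((n : Int) + 1) K := by
  simp [Gsum, List.range_succ]

theorem L1 (K : Int) (hK : 2 ≤ K) :
    ∀ (n : Nat),
    Gsum n K = pyTri n - K * pyTri ((n / K.toNat : Nat) : Int) + Gsum (n / K.toNat) K := by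
  intro n
  induction n with
  | zero => simp [Gsum, pyTri_zero]
  | succ n ih =>
    set J : Nat := K.toNat with hJ
    have hJK : (J : Int) = K := by omega
    have hKne : K ≠ 0 := by omega
    have hJ0 : 0 < J := by omega
    have hdiv : PySem.Int.mod ((n : Int) + 1) K = 0 ↔ J ∣ (n + 1) := by
      rw [PySem.Int.mod_eq_zero_iff_dvd]
      constructor
      · intro h
        have h1 : K.natAbs ∣ ((n : Int) + 1).natAbs := Int.natAbs_dvd_natAbs.mpr h
        have h2 : K.natAbs = J := by omega
        rw [h2] at h1
        simpa using h1
      · intro h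
        have h1 : K.natAbs ∣ ((n : Int) + 1).natAbs := by
          have h2 : K.natAbs = J := by omega
          rw [h2]; simpa using h
        exact Int.natAbs_dvd_natAbs.mp h1
    rw [Gsum_succ n K]
    by_cases hd : J ∣ (n + 1)
    · have hmod : PySem.Int.mod ((n : Int) + 1) K = 0 := hdiv.mpr hd
      have hm' : (n + 1) / J = n / J + 1 := by rw [Nat.succ_div, if_pos hd]
      obtain ⟨m', hm'eq⟩ := hd
      have hm'val : (n + 1) / J = m' := by rw [hm'eq, Nat.mul_div_cancel_left _ hJ0]
      have hne : (n : Int) + 1 ≠ 0 := by omega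
      have hcast : ((n : Int) + 1) = (m' : Int) * K := by
        rw [← hJK]; exact_mod_cast (by rw [hm'eq]; ring : ((n+1 : Nat)) = m' * J)
      have hfd : PySem.Int.floordiv ((n : Int) + 1) K = (m' : Int) := by
        rw [hcast]; exact floordiv_exact _ _ hKne
      have hsC : stripC ((n : Int) + 1) K = stripC (m' : Int) K := by
        rw [stripC_of_dvd _ _ hK hmod hne, hfd]
      have hm2 : m' = n / J + 1 := by omega
      rw [ih, hm'val, hsC, hm2, Gsum_succ (n / J) K]
      have hpt1 := pyTri_succ (n : Int)
      have hpt2 := pyTri_succ ((n / J : Nat) : Int)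
      have hc2 : ((n : Int) + 1) = (J : Int) * ((n / J : Nat) : Int) + (J : Int) := by
        have : ((n + 1 : Nat) : Int) = ((J * (n / J + 1) : Nat) : Int) := by
          rw [← hm2, ← hm'eq]
        push_cast at this
        push_cast
        linarith
      simp only [Nat.cast_add, Nat.cast_one]
      rw [hpt1, hpt2, hJK] at *
      linarith [hc2]
    · have hsC : stripC ((n : Int) + 1) K = (n : Int) + 1 := by
        apply stripC_of_not_dvd
        · exact fun hc => hd (hdiv.mp hc)
        · omega
      have hm' : (n + 1) / J = n / J := by
        simp [Nat.succ_div, hd]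
      rw [ih, hsC, hm']
      simp only [Nat.cast_add, Nat.cast_one]
      rw [pyTri_succ]
      ring

theorem goB_eq (K : Int) (hK : 2 ≤ K) :
    ∀ (n fuel : Nat), n < fuel →
    goB fuel (n : Int) K = Gsum n K := by
  intro n
  induction n using Nat.strong_induction_on with
  | _ n ih =>
    intro fuel hfuel
    obtain ⟨f, rfl⟩ : ∃ f, fuel = f + 1 := ⟨fuel - 1, by omega⟩
    by_cases hn : n = 0
    · subst hn; simp [goB, Gsum]
    · have hpos : ¬ ((n : Int) ≤ 0) := by omega
      simp only [goB, if_neg hpos]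
      have hfd : PySem.Int.floordiv (n : Int) K = ((n / K.toNat : Nat) : Int) := by
        rw [show K = ((K.toNat : Nat) : Int) by omega]
        exact_mod_cast PySem.Int.floordiv_natCast n K.toNat
      rw [hfd]
      have hlt : n / K.toNat < n := Nat.div_lt_self (by omega) (by omega)
      rw [ih (n / K.toNat) hlt f (by omega)]
      exact (L1 K hK n).symm

theorem foldl_strip (K : Int) :
    ∀ n : Nat, (((List.range n).map (fun k : Nat => (1:Int) + (k:Int))).foldl
      (fun s number => s + stripA number.natAbs number K) 0) = Gsum n K := by
  intro n
  induction n with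
  | zero => simp [Gsum]
  | succ n ih =>
    rw [List.range_succ, List.map_append, List.foldl_append, ih, Gsum_succ]
    simp only [List.map_cons, List.map_nil, List.foldl_cons, List.foldl_nil]
    rw [show (1:Int) + (n:Int) = (n:Int) + 1 from by ring]
    simp [stripC]

theorem A_eq_Gsum (N K : Int) (hN : 0 ≤ N) :
    calculate_sum0 N K = Gsum N.toNat K := by
  unfold calculate_sum0
  rw [PySem.List.pyRange_one]
  have hlen : (N + 1 - 1).toNat = N.toNat := by omega
  rw [hlen]
  exact foldl_strip K N.toNat

theorem pyTri_neg_one : pyTri (-1) = 0 := by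
  have := pyTri_spec (-1); omega

theorem floordiv_small_neg (N K : Int) (hN : 1 ≤ N) (hK : K ≤ -2) (h : N < -K) :
    PySem.Int.floordiv N K = -1 := by
  obtain ⟨hlo, hhi⟩ := PySem.Int.mod_neg_bounds (a := N) (b := K) (by omega)
  have heq := PySem.Int.floordiv_mul_add_mod N K
  set fd := PySem.Int.floordiv N K
  have h1 : 0 < fd * K := by omega
  have h2 : fd * K < -2 * K := by omega
  have hfdneg : fd < 0 := by nlinarith
  have hfdgt : -2 < fd := by nlinarith
  omega

theorem Gsum_no_dvd (K : Int) (hK : K ≤ -2) :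
    ∀ n : Nat, (n : Int) < -K → Gsum n K = pyTri n := by
  intro n
  induction n with
  | zero => simp [Gsum, pyTri_zero]
  | succ n ih =>
    intro h
    have hmod : PySem.Int.mod ((n : Int) + 1) K ≠ 0 := by
      rw [Ne, PySem.Int.mod_eq_zero_iff_dvd]
      intro hd
      have h1 : K.natAbs ∣ ((n : Int) + 1).natAbs := Int.natAbs_dvd_natAbs.mpr hd
      have h2 : K.natAbs ≤ ((n : Int) + 1).natAbs := Nat.le_of_dvd (by omega) h1
      omega
    rw [Gsum_succ, stripC_of_not_dvd _ _ hmod (by omega), ih (by push_cast at h ⊢; omega)]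
    push_cast
    rw [pyTri_succ]

-- ===== VERDICT (by name: the statement is the Claim_ definition above) =====
theorem calculate_sum0_spec : Claim_equal_calculate_sum0 := by
  intro N K _ hpre
  unfold Spec_calculate_sum0 calculate_sum0_alt
  by_cases hN : N ≤ 0
  · rw [show N.toNat = 0 by omega]
    unfold calculate_sum0
    rw [PySem.List.pyRange_one_eq_nil (by omega)]
    simp [goB, hN]
  · have hcast : ((N.toNat : Nat) : Int) = N := Int.toNat_of_nonneg (by omega)
    by_cases hK : 2 ≤ K
    · rw [A_eq_Gsum N K (by omega)]
      have h := goB_eq K hK N.toNat (N.toNat + 1) (by omega)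
      rw [hcast] at h
      exact h.symm
    · have hlt : N < -K := by rcases hpre with h | h | h <;> omega
      have hKneg : K ≤ -2 := by omega
      rw [A_eq_Gsum N K (by omega), Gsum_no_dvd K hKneg N.toNat (by omega)]
      obtain ⟨f, hf⟩ : ∃ f, N.toNat = f + 1 := ⟨N.toNat - 1, by omega⟩
      rw [hf]
      simp only [goB, if_neg (show ¬ (N ≤ 0) by omega)]
      rw [floordiv_small_neg N K (by omega) hKneg hlt, pyTri_neg_one]
      simp only [if_pos (show (-1 : Int) ≤ 0 by omega)]
      rw [← hf, hcast]
      ring
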